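-- pv_equiv track=rewrite | github.com/sergeylobachev/leetcode | DSA/DFS_with_Timestamps_Iterative.py | dfs
-- ===== SOURCE A (Python) =====
-- def dfs(al):
--     time = 0
--
--     N = len(al)
--     color = ["white"] * N
--     parent = [None] * N
--     d = [0] * N ## d -- discovered timestamp
--     f = [0] * N ## f -- finished timestamp
--
--     s = []
--
--     for u in range(N):
--         if color[u] == "white":
--             s.append((u, "start"))
--
--             while s:
--                 node, action = s.pop()
--
--                 if action == "start":
--                     if color[node] == "white":
--                         time += 1
--                         d[node] = time
--                         color[node] = "gray"
--                         s.append((node, "end"))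
--                         for v in reversed(al[node]):
--                             if color[v] == "white":
--                                 parent[v] = node
--                                 s.append((v, "start"))
--                 elif action == "end":
--                     time += 1
--                     f[node] = time
--                     color[node] = "black"
--
--     return d
-- ===== SOURCE B (Python) =====
-- def dfs(al):
--     N = len(al)
--     time = 0
--     color = ["white"] * N
--     parent = [None] * N
--     d = [0] * N  ## d -- discovered timestamp
--     f = [0] * N  ## f -- finished timestamp
--
--     for r in range(N):
--         if color[r] != "white":
--             continue
--         time += 1
--         d[r] = time
--         color[r] = "gray"
--         stack = [(r, 0)]  # (node, index of next neighbor to look at)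
--
--         while stack:
--             u, i = stack[-1]
--             if i < len(al[u]):
--                 stack[-1] = (u, i + 1)
--                 v = al[u][i]
--                 if color[v] == "white":
--                     parent[v] = u
--                     time += 1
--                     d[v] = time
--                     color[v] = "gray"
--                     stack.append((v, 0))
--             else:
--                 stack.pop()
--                 time += 1
--                 f[u] = time
--                 color[u] = "black"
--
--     return d
-- ===== Notes on version B (the rewrite author's own statement) =====
-- stated objective: alternative
-- what changed: Replaces A's event stack of (node,'start'/'end') entries -- which eagerly pushes all currently-white neighbors in reverse and re-checks whiteness at pop time -- by the classic cursor-stack DFS: the stack holds one (node, next-neighbor-index) frame per gray node, neighbors are expanded lazily with a single whiteness check, and the stack never exceeds one frame per node.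
import Mathlib
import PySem

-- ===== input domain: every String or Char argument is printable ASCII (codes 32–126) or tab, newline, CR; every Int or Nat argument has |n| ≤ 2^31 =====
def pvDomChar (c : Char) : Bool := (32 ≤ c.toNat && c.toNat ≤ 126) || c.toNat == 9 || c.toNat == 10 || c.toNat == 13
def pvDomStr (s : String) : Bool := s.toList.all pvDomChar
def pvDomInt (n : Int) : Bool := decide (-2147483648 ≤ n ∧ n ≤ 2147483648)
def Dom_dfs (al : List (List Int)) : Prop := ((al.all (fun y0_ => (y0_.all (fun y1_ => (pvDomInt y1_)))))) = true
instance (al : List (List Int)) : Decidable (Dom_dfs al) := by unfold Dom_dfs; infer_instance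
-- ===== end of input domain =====

-- B replaces A's event stack ((node,"start"/"end") entries, eager reversed pushing of white
-- neighbors, whiteness re-checked at pop) by a cursor-stack DFS (one (node, next-index) frame
-- per gray node, lazy neighbor expansion); same discovery timestamps, similar cost ("alternative").
-- Both Pythons only fill `parent`/`f` and never read them; the return value is `d`.

-- The mutable program state shared by both ports (time, color, parent, d, f).
structure DfsCore where
  time : Int
  color : List String
  parent : List (Option Int)
  d : List Int
  f : List Int
deriving Repr, DecidableEq

-- Needed by the termination arguments of both loops (ports cite them in decreasing_by).
theorem pyIdx?_lt {n : Nat} {i : Int} {k : Nat}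
    (h : PySem.List.pyIdx? n i = some k) : k < n := by
  unfold PySem.List.pyIdx? at h
  split_ifs at h <;> simp_all <;> omega

theorem pySetD_invalid {α : Type} (xs : List α) (i : Int) (v : α)
    (h : PySem.List.pyIdx? xs.length i = none) : PySem.List.pySetD xs i v = xs := by
  simp [PySem.List.pySetD, PySem.List.pySet?, h]

theorem pySetD_valid {α : Type} (xs : List α) (i : Int) (v : α) (k : Nat)
    (h : PySem.List.pyIdx? xs.length i = some k) : PySem.List.pySetD xs i v = xs.set k v := by
  simp [PySem.List.pySetD, PySem.List.pySet?, h]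

theorem pyGetD_valid {α : Type} (xs : List α) (i : Int) (d : α) (k : Nat)
    (h : PySem.List.pyIdx? xs.length i = some k) :
    PySem.List.pyGetD xs i d = xs.getD k d := by
  simp [PySem.List.pyGetD, PySem.List.pyGet?, h, List.getD]

theorem count_set_le (c : List String) (k : Nat) (x : String) (hx : x ≠ "white") :
    (c.set k x).count "white" ≤ c.count "white" := by
  induction c generalizing k with
  | nil => simp
  | cons a c ih =>
    cases k with
    | zero =>
      simp only [List.set, List.count_cons, beq_iff_eq, hx, if_false]
      omega
    | succ k =>
      simp only [List.set, List.count_cons]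
      have := ih k
      omega

theorem count_set_lt (c : List String) (k : Nat) (x : String) (hx : x ≠ "white")
    (hk : k < c.length) (hw : c.getD k "" = "white") :
    (c.set k x).count "white" < c.count "white" := by
  induction c generalizing k with
  | nil => simp at hk
  | cons a c ih =>
    cases k with
    | zero =>
      simp only [List.getD_cons_zero] at hw
      simp only [List.set, List.count_cons, beq_iff_eq, hx, if_false, hw, if_true]
      omega
    | succ k =>
      simp only [List.length_cons, Nat.succ_lt_succ_iff] at hk
      simp only [List.getD_cons_succ] at hw
      simp only [List.set, List.count_cons]
      have := ih k hk hw
      omega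

-- color-list facts phrased through the Python indexing primitives
theorem cw_pySetD_le (c : List String) (i : Int) (x : String) (hx : x ≠ "white") :
    (PySem.List.pySetD c i x).count "white" ≤ c.count "white" := by
  cases h : PySem.List.pyIdx? c.length i with
  | none => rw [pySetD_invalid _ _ _ h]
  | some k => rw [pySetD_valid _ _ _ _ h]; exact count_set_le c k x hx

theorem cw_pySetD_lt (c : List String) (i : Int) (x : String) (hx : x ≠ "white")
    (hw : PySem.List.pyGetD c i "" = "white") :
    (PySem.List.pySetD c i x).count "white" < c.count "white" := by
  cases h : PySem.List.pyIdx? c.length i with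
  | none => simp [PySem.List.pyGetD, PySem.List.pyGet?, h] at hw
  | some k =>
    rw [pySetD_valid _ _ _ _ h]
    exact count_set_lt c k x hx (pyIdx?_lt h) (by rw [pyGetD_valid _ _ _ _ h] at hw; exact hw)

-- ===== PORT A =====
-- A's while-loop: a stack of (node, action) events, head = top of the Python list.
def loopA (al : List (List Int)) : List (Int × String) → DfsCore → DfsCore
  | [], σ => σ
  | (node, action) :: rest, σ =>
    if action = "start" then
      if hw : PySem.List.pyGetD σ.color node "" = "white" then
        let t := σ.time + 1
        let σ1 : DfsCore := ⟨t, PySem.List.pySetD σ.color node "gray", σ.parent,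
                          PySem.List.pySetD σ.d node t, σ.f⟩
        -- push (node,"end"); then for v in reversed(al[node]): if white: parent[v]=node; push (v,"start")
        let sp := (PySem.List.pyGetD al node []).reverse.foldl
            (fun (p : List (Int × String) × List (Option Int)) v =>
              if PySem.List.pyGetD σ1.color v "" = "white" then
                ((v, "start") :: p.1, PySem.List.pySetD p.2 v (some node))
              else p)
            ((node, "end") :: rest, σ1.parent)
        loopA al sp.1 ⟨σ1.time, σ1.color, sp.2, σ1.d, σ1.f⟩
      else loopA al rest σ
    else if action = "end" then
      let t := σ.time + 1
      loopA al rest ⟨t, PySem.List.pySetD σ.color node "black", σ.parent, σ.d,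
                     PySem.List.pySetD σ.f node t⟩
    else loopA al rest σ
termination_by s σ => (σ.color.count "white", s.length)
decreasing_by
  · exact Prod.Lex.left _ _ (cw_pySetD_lt _ _ _ (by decide) hw)
  · exact Prod.Lex.right _ (Nat.lt_succ_self _)
  · rcases Nat.lt_or_ge ((PySem.List.pySetD σ.color node "black").count "white")
      (σ.color.count "white") with h | h
    · exact Prod.Lex.left _ _ h
    · have := cw_pySetD_le σ.color node "black" (by decide)
      have heq : (PySem.List.pySetD σ.color node "black").count "white" = σ.color.count "white" :=
        le_antisymm this h
      rw [heq]; exact Prod.Lex.right _ (Nat.lt_succ_self _)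
  · exact Prod.Lex.right _ (Nat.lt_succ_self _)

def dfs (al : List (List Int)) : List Int :=
  let N := al.length
  let σ0 : DfsCore := ⟨0, List.replicate N "white", List.replicate N none,
                    List.replicate N 0, List.replicate N 0⟩
  ((List.range N).foldl (fun σ u =>
      if PySem.List.pyGetD σ.color (u : Int) "" = "white" then
        loopA al [((u : Int), "start")] σ
      else σ) σ0).d

-- ===== PORT B =====
-- B's while-loop: a stack of (node, next-neighbor-index) frames, head = top.
def loopB (al : List (List Int)) : List (Int × Int) → DfsCore → DfsCore
  | [], σ => σ
  | (u, i) :: fr, σ =>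
    if hlt : i < ((PySem.List.pyGetD al u []).length : Int) then
      let v := PySem.List.pyGetD (PySem.List.pyGetD al u []) i 0
      if hw : PySem.List.pyGetD σ.color v "" = "white" then
        let t := σ.time + 1
        loopB al ((v, 0) :: (u, i + 1) :: fr)
          ⟨t, PySem.List.pySetD σ.color v "gray", PySem.List.pySetD σ.parent v (some u),
           PySem.List.pySetD σ.d v t, σ.f⟩
      else loopB al ((u, i + 1) :: fr) σ
    else
      let t := σ.time + 1
      loopB al fr ⟨t, PySem.List.pySetD σ.color u "black", σ.parent, σ.d,
                   PySem.List.pySetD σ.f u t⟩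
termination_by fr σ =>
  (σ.color.count "white", fr.length,
   match fr with
   | [] => 0
   | (u, i) :: _ => ((((PySem.List.pyGetD al u []).length : Int)) - i).toNat)
decreasing_by
  · exact Prod.Lex.left _ _ (cw_pySetD_lt _ _ _ (by decide) hw)
  · apply Prod.Lex.right; apply Prod.Lex.right; omega
  · rcases Nat.lt_or_ge ((PySem.List.pySetD σ.color u "black").count "white")
      (σ.color.count "white") with h | h
    · exact Prod.Lex.left _ _ h
    · have := cw_pySetD_le σ.color u "black" (by decide)
      have heq : (PySem.List.pySetD σ.color u "black").count "white" = σ.color.count "white" :=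
        le_antisymm this h
      rw [heq]; exact Prod.Lex.right _ (Prod.Lex.left _ _ (Nat.lt_succ_self _))

def dfs_alt (al : List (List Int)) : List Int :=
  let N := al.length
  let σ0 : DfsCore := ⟨0, List.replicate N "white", List.replicate N none,
                    List.replicate N 0, List.replicate N 0⟩
  ((List.range N).foldl (fun σ r =>
      if PySem.List.pyGetD σ.color (r : Int) "" = "white" then
        let t := σ.time + 1
        loopB al [((r : Int), 0)]
          ⟨t, PySem.List.pySetD σ.color (r : Int) "gray", σ.parent,
           PySem.List.pySetD σ.d (r : Int) t, σ.f⟩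
      else σ) σ0).d

-- ===== PRECONDITION & SPEC =====
-- Pre_: exactly the inputs where Python A returns normally; for a neighbor v outside
-- [-len(al), len(al)) the read color[v] raises IndexError.
def Pre_dfs (al : List (List Int)) : Prop :=
  ∀ l ∈ al, ∀ v ∈ l, -(al.length : Int) ≤ v ∧ v < (al.length : Int)
instance (al : List (List Int)) : Decidable (Pre_dfs al) := by unfold Pre_dfs; infer_instance

def pvWitness_dfs : List (List Int) := [[1, -1], [2], [0]]

def Spec_dfs (al : List (List Int)) (out : List Int) : Prop := out = dfs_alt al
instance (al : List (List Int)) (out : List Int) : Decidable (Spec_dfs al out) := by unfold Spec_dfs; infer_instance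

-- ===== CLAIM (what is proved, stated in full; the proofs are below) =====
def Claim_equal_dfs : Prop := ∀ (al : List (List Int)), Dom_dfs al → Pre_dfs al → Spec_dfs al (dfs al)

-- ===== LEMMAS AND PROOFS =====

theorem pyGetD_invalid {α : Type} (xs : List α) (i : Int) (d : α)
    (h : PySem.List.pyIdx? xs.length i = none) : PySem.List.pyGetD xs i d = d := by
  simp [PySem.List.pyGetD, PySem.List.pyGet?, h]


-- The observable part of the state: everything except `parent` (which neither program reads).
structure SCore where
  time : Int
  color : List String
  d : List Int
  f : List Int
deriving Repr, DecidableEq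

def obs (σ : DfsCore) : SCore := ⟨σ.time, σ.color, σ.d, σ.f⟩

def smark (u : Int) (t : SCore) : SCore :=
  ⟨t.time + 1, PySem.List.pySetD t.color u "gray", PySem.List.pySetD t.d u (t.time + 1), t.f⟩

def sfinish (u : Int) (t : SCore) : SCore :=
  ⟨t.time + 1, PySem.List.pySetD t.color u "black", t.d, PySem.List.pySetD t.f u (t.time + 1)⟩

-- The common recursive specification: fuelled recursive DFS visit.
def svisit (al : List (List Int)) : Nat → Int → SCore → SCore
  | 0, _, t => t
  | k + 1, u, t =>
    sfinish u ((PySem.List.pyGetD al u []).foldl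
      (fun s v => if PySem.List.pyGetD s.color v "" = "white" then svisit al k v s else s)
      (smark u t))

def sfold (al : List (List Int)) (k : Nat) (vs : List Int) (t : SCore) : SCore :=
  vs.foldl (fun s v => if PySem.List.pyGetD s.color v "" = "white" then svisit al k v s else s) t

theorem svisit_succ (al : List (List Int)) (k : Nat) (u : Int) (t : SCore) :
    svisit al (k + 1) u t = sfinish u (sfold al k (PySem.List.pyGetD al u []) (smark u t)) := rfl

-- parent-erased copies of the two loops
def sloopA (al : List (List Int)) : List (Int × String) → SCore → SCore
  | [], t => t
  | (node, action) :: rest, t =>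
    if action = "start" then
      if hw : PySem.List.pyGetD t.color node "" = "white" then
        let t1 := smark node t
        sloopA al ((PySem.List.pyGetD al node []).reverse.foldl
            (fun acc v => if PySem.List.pyGetD t1.color v "" = "white" then (v, "start") :: acc else acc)
            ((node, "end") :: rest)) t1
      else sloopA al rest t
    else if action = "end" then sloopA al rest (sfinish node t)
    else sloopA al rest t
termination_by s t => (t.color.count "white", s.length)
decreasing_by
  · exact Prod.Lex.left _ _ (cw_pySetD_lt _ _ _ (by decide) hw)
  · exact Prod.Lex.right _ (Nat.lt_succ_self _)
  · rcases Nat.lt_or_ge ((PySem.List.pySetD t.color node "black").count "white")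
      (t.color.count "white") with h | h
    · exact Prod.Lex.left _ _ h
    · have := cw_pySetD_le t.color node "black" (by decide)
      have heq : (PySem.List.pySetD t.color node "black").count "white" = t.color.count "white" :=
        le_antisymm this h
      rw [sfinish, heq]; exact Prod.Lex.right _ (Nat.lt_succ_self _)
  · exact Prod.Lex.right _ (Nat.lt_succ_self _)

def sloopB (al : List (List Int)) : List (Int × Int) → SCore → SCore
  | [], t => t
  | (u, i) :: fr, t =>
    if hlt : i < ((PySem.List.pyGetD al u []).length : Int) then
      let v := PySem.List.pyGetD (PySem.List.pyGetD al u []) i 0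
      if hw : PySem.List.pyGetD t.color v "" = "white" then
        sloopB al ((v, 0) :: (u, i + 1) :: fr) (smark v t)
      else sloopB al ((u, i + 1) :: fr) t
    else sloopB al fr (sfinish u t)
termination_by fr t =>
  (t.color.count "white", fr.length,
   match fr with
   | [] => 0
   | (u, i) :: _ => ((((PySem.List.pyGetD al u []).length : Int)) - i).toNat)
decreasing_by
  · exact Prod.Lex.left _ _ (cw_pySetD_lt _ _ _ (by decide) hw)
  · apply Prod.Lex.right; apply Prod.Lex.right; omega
  · rcases Nat.lt_or_ge ((PySem.List.pySetD t.color u "black").count "white")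
      (t.color.count "white") with h | h
    · exact Prod.Lex.left _ _ h
    · have := cw_pySetD_le t.color u "black" (by decide)
      have heq : (PySem.List.pySetD t.color u "black").count "white" = t.color.count "white" :=
        le_antisymm this h
      rw [sfinish, heq]; exact Prod.Lex.right _ (Prod.Lex.left _ _ (Nat.lt_succ_self _))

-- first component of A's push-fold ignores the parent component
theorem fold_push_fst (C : Int → Prop) [DecidablePred C] (g : List (Option Int) → Int → List (Option Int))
    (l : List Int) (acc : List (Int × String)) (par : List (Option Int)) :
    (l.foldl (fun (p : List (Int × String) × List (Option Int)) v =>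
        if C v then ((v, "start") :: p.1, g p.2 v) else p) (acc, par)).1 =
    l.foldl (fun acc v => if C v then (v, "start") :: acc else acc) acc := by
  induction l generalizing acc par with
  | nil => rfl
  | cons v l ih =>
    simp only [List.foldl_cons]
    by_cases h : C v <;> simp [h, ih]

-- the push-fold produces the forward-order filtered starts
theorem fold_push_eq (C : Int → Prop) [DecidablePred C] (l : List Int) (acc : List (Int × String)) :
    l.reverse.foldl (fun acc v => if C v then (v, "start") :: acc else acc) acc =
    (l.filter (fun v => decide (C v))).map (fun v => (v, "start")) ++ acc := by
  induction l generalizing acc with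
  | nil => rfl
  | cons v l ih =>
    simp only [List.reverse_cons, List.foldl_append, List.foldl_cons, List.foldl_nil]
    by_cases h : C v <;> simp [h, ih]

-- projections: each port computes its parent-erased loop on the observable state
theorem obs_loopA (al : List (List Int)) (s : List (Int × String)) (σ : DfsCore) :
    obs (loopA al s σ) = sloopA al s (obs σ) := by
  fun_induction loopA al s σ with
  | case1 σ => rw [sloopA]
  | case2 node rest σ hw t σ1 sp ih =>
    rw [sloopA, if_pos rfl,
      dif_pos (show PySem.List.pyGetD (obs σ).color node "" = "white" from hw), ih]
    congr 1
    show (List.foldl (fun (p : List (Int × String) × List (Option Int)) v =>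
        if PySem.List.pyGetD σ1.color v "" = "white" then
          ((v, "start") :: p.1, PySem.List.pySetD p.2 v (some node))
        else p)
      ((node, "end") :: rest, σ1.parent) (PySem.List.pyGetD al node []).reverse).1 = _
    rw [fold_push_fst (fun v => PySem.List.pyGetD σ1.color v "" = "white")
      (fun p v => PySem.List.pySetD p v (some node))]
    rfl
  | case3 node rest σ hw ih =>
    rw [sloopA, if_pos rfl, dif_neg (show ¬ PySem.List.pyGetD (obs σ).color node "" = "white" from hw)]
    exact ih
  | case4 node rest σ t hne ih =>
    rw [sloopA, if_neg (by decide : ¬ ("end" : String) = "start"), if_pos rfl]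
    exact ih
  | case5 node action rest σ h1 h2 ih =>
    rw [sloopA, if_neg h1, if_neg h2]; exact ih

theorem obs_loopB (al : List (List Int)) (fr : List (Int × Int)) (σ : DfsCore) :
    obs (loopB al fr σ) = sloopB al fr (obs σ) := by
  fun_induction loopB al fr σ with
  | case1 σ => rw [sloopB]
  | case2 u i fr σ hlt v hw t ih =>
    rw [sloopB, dif_pos hlt]
    simp only []
    rw [dif_pos (show PySem.List.pyGetD (obs σ).color v "" = "white" from hw)]
    exact ih
  | case3 u i fr σ hlt v hw ih =>
    rw [sloopB, dif_pos hlt]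
    simp only []
    rw [dif_neg (show ¬ PySem.List.pyGetD (obs σ).color v "" = "white" from hw)]
    exact ih
  | case4 u i fr σ hlt t ih =>
    rw [sloopB, dif_neg hlt]
    exact ih

-- nonwhite cells survive a write of a non-"white" value
theorem white_of_pySetD (c : List String) (i j : Int) (x : String) (hx : x ≠ "white")
    (h : PySem.List.pyGetD (PySem.List.pySetD c i x) j "" = "white") :
    PySem.List.pyGetD c j "" = "white" := by
  cases hi : PySem.List.pyIdx? c.length i with
  | none => rwa [pySetD_invalid _ _ _ hi] at h
  | some k =>
    rw [pySetD_valid _ _ _ _ hi] at h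
    have hlen : (c.set k x).length = c.length := by simp
    cases hj : PySem.List.pyIdx? c.length j with
    | none =>
      rw [pyGetD_invalid] at h
      · exact absurd h (by decide)
      · rwa [hlen]
    | some m =>
      rw [pyGetD_valid _ _ _ m (by rwa [hlen])] at h
      rw [pyGetD_valid _ _ _ m hj]
      by_cases hmk : m = k
      · subst hmk
        rw [List.getD_eq_getElem _ _ (by simpa using pyIdx?_lt hj)] at h
        rw [List.getElem_set_self (by simpa using pyIdx?_lt hj)] at h
        exact absurd h hx
      · rw [List.getD_eq_getElem _ _ (by simpa using pyIdx?_lt hj)] at h ⊢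
        rwa [List.getElem_set_ne (by omega)] at h

-- a white cell exists, so the white count is positive
theorem white_cw_pos (c : List String) (v : Int)
    (h : PySem.List.pyGetD c v "" = "white") : 0 < c.count "white" := by
  cases hi : PySem.List.pyIdx? c.length v with
  | none => rw [pyGetD_invalid _ _ _ hi] at h; exact absurd h (by decide)
  | some k =>
    rw [pyGetD_valid _ _ _ _ hi, List.getD_eq_getElem _ _ (by simpa using pyIdx?_lt hi)] at h
    exact List.count_pos_iff.mpr (h ▸ List.getElem_mem _)

-- the monotone relation: white count does not grow, nonwhite stays nonwhite
def WRel (t t' : SCore) : Prop :=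
  t'.color.count "white" ≤ t.color.count "white" ∧
  ∀ w, PySem.List.pyGetD t'.color w "" = "white" → PySem.List.pyGetD t.color w "" = "white"

theorem Rel_refl (t : SCore) : WRel t t := ⟨le_refl _, fun _ h => h⟩

theorem Rel_trans {a b c : SCore} (h1 : WRel a b) (h2 : WRel b c) : WRel a c :=
  ⟨h2.1.trans h1.1, fun w h => h1.2 w (h2.2 w h)⟩

theorem Rel_smark (u : Int) (t : SCore) : WRel t (smark u t) :=
  ⟨cw_pySetD_le _ _ _ (by decide), fun w h => white_of_pySetD _ _ _ _ (by decide) h⟩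

theorem Rel_sfinish (u : Int) (t : SCore) : WRel t (sfinish u t) :=
  ⟨cw_pySetD_le _ _ _ (by decide), fun w h => white_of_pySetD _ _ _ _ (by decide) h⟩

theorem Rel_sfold_of (al : List (List Int)) (k : Nat)
    (hv : ∀ v t, WRel t (svisit al k v t)) :
    ∀ (vs : List Int) (t : SCore), WRel t (sfold al k vs t) := by
  intro vs
  induction vs with
  | nil => exact fun t => Rel_refl t
  | cons v vs ih =>
    intro t
    show WRel t (sfold al k vs (if PySem.List.pyGetD t.color v "" = "white" then svisit al k v t else t))
    by_cases h : PySem.List.pyGetD t.color v "" = "white"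
    · rw [if_pos h]; exact Rel_trans (hv v t) (ih _)
    · rw [if_neg h]; exact ih t

theorem Rel_svisit (al : List (List Int)) :
    ∀ (k : Nat) (v : Int) (t : SCore), WRel t (svisit al k v t) := by
  intro k
  induction k with
  | zero => exact fun v t => Rel_refl t
  | succ k ih =>
    intro v t
    rw [svisit_succ]
    exact Rel_trans (Rel_smark v t) (Rel_trans (Rel_sfold_of al k ih _ _) (Rel_sfinish _ _))

-- skipping neighbors that are already nonwhite does not change the fold
theorem sfold_filter_aux (al : List (List Int)) (k : Nat) :
    ∀ (l : List Int) (t s : SCore),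
    (∀ v ∈ l, ¬ PySem.List.pyGetD t.color v "" = "white" → ¬ PySem.List.pyGetD s.color v "" = "white") →
    sfold al k (l.filter (fun v => decide (PySem.List.pyGetD t.color v "" = "white"))) s =
    sfold al k l s := by
  intro l
  induction l with
  | nil => intro t s _; rfl
  | cons v l ih =>
    intro t s h
    by_cases hv : PySem.List.pyGetD t.color v "" = "white"
    · simp only [List.filter_cons, hv, decide_true, if_true]
      show sfold al k (List.filter _ l) (if PySem.List.pyGetD s.color v "" = "white" then svisit al k v s else s) = sfold al k l (if PySem.List.pyGetD s.color v "" = "white" then svisit al k v s else s)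
      by_cases hs : PySem.List.pyGetD s.color v "" = "white"
      · rw [if_pos hs]
        exact ih t _ (fun w hw hnw => fun hww => ((h w (List.mem_cons_of_mem _ hw) hnw) ((Rel_svisit al k v s).2 w hww)))
      · rw [if_neg hs]
        exact ih t s (fun w hw hnw => h w (List.mem_cons_of_mem _ hw) hnw)
    · have hs : ¬ PySem.List.pyGetD s.color v "" = "white" := h v (List.mem_cons_self) hv
      simp only [List.filter_cons, hv, decide_false]
      show sfold al k (List.filter _ l) s = sfold al k (v :: l) s
      have : sfold al k (v :: l) s = sfold al k l s := by
        show sfold al k l (if PySem.List.pyGetD s.color v "" = "white" then svisit al k v s else s) = _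
        rw [if_neg hs]
      rw [this]
      exact ih t s (fun w hw hnw => h w (List.mem_cons_of_mem _ hw) hnw)

theorem sfold_filter (al : List (List Int)) (k : Nat) (l : List Int) (t : SCore) :
    sfold al k (l.filter (fun v => decide (PySem.List.pyGetD t.color v "" = "white"))) t =
    sfold al k l t :=
  sfold_filter_aux al k l t t (fun _ _ h => h)

-- simulation: A's event-stack loop computes the recursive DFS
theorem sloopA_start_cons (al : List (List Int)) (v : Int) (rest : List (Int × String)) (t : SCore)
    (hw : PySem.List.pyGetD t.color v "" = "white") :
    sloopA al ((v, "start") :: rest) t =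
      sloopA al (((PySem.List.pyGetD al v []).filter
          (fun w => decide (PySem.List.pyGetD (smark v t).color w "" = "white"))).map
            (fun w => (w, "start")) ++ (v, "end") :: rest) (smark v t) := by
  rw [sloopA, if_pos rfl, dif_pos hw]
  simp only []
  rw [fold_push_eq (fun w => PySem.List.pyGetD (smark v t).color w "" = "white")]

theorem sloopA_start_cons_nw (al : List (List Int)) (v : Int) (rest : List (Int × String)) (t : SCore)
    (hw : ¬ PySem.List.pyGetD t.color v "" = "white") :
    sloopA al ((v, "start") :: rest) t = sloopA al rest t := by
  rw [sloopA, if_pos rfl, dif_neg hw]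

theorem sloopA_end_cons (al : List (List Int)) (v : Int) (rest : List (Int × String)) (t : SCore) :
    sloopA al ((v, "end") :: rest) t = sloopA al rest (sfinish v t) := by
  rw [sloopA, if_neg (by decide : ¬ ("end" : String) = "start"), if_pos rfl]

theorem sfold_cons (al : List (List Int)) (k : Nat) (v : Int) (vs : List Int) (t : SCore) :
    sfold al k (v :: vs) t =
      sfold al k vs (if PySem.List.pyGetD t.color v "" = "white" then svisit al k v t else t) := rfl

theorem LA (al : List (List Int)) :
    ∀ (k : Nat) (vs : List Int) (rest : List (Int × String)) (t : SCore),
    t.color.count "white" ≤ k →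
    sloopA al (vs.map (fun v => (v, "start")) ++ rest) t = sloopA al rest (sfold al k vs t) := by
  intro k
  induction k with
  | zero =>
    intro vs
    induction vs with
    | nil => intro rest t _; rfl
    | cons v vs ih =>
      intro rest t h
      have hnw : ¬ PySem.List.pyGetD t.color v "" = "white" := fun hwv =>
        absurd (white_cw_pos _ _ hwv) (by omega)
      rw [List.map_cons, List.cons_append, sloopA_start_cons_nw al v _ t hnw,
        sfold_cons, if_neg hnw]
      exact ih rest t h
  | succ k ihk =>
    intro vs
    induction vs with
    | nil => intro rest t _; rfl
    | cons v vs ih =>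
      intro rest t h
      rw [List.map_cons, List.cons_append, sfold_cons]
      by_cases hwv : PySem.List.pyGetD t.color v "" = "white"
      · rw [if_pos hwv, sloopA_start_cons al v _ t hwv]
        have hcw : (smark v t).color.count "white" ≤ k := by
          have := cw_pySetD_lt t.color v "gray" (by decide) hwv
          show (PySem.List.pySetD t.color v "gray").count "white" ≤ k
          omega
        rw [ihk _ _ _ hcw, sfold_filter, sloopA_end_cons, ← svisit_succ]
        exact ih rest _ (((Rel_svisit al (k + 1) v t).1).trans h)
      · rw [if_neg hwv, sloopA_start_cons_nw al v _ t hwv]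
        exact ih rest t h

-- simulation: B's cursor-stack loop computes the recursive DFS
theorem pyIdx?_of_nonneg (n : Nat) (i : Int) (h0 : 0 ≤ i) (h1 : i < (n : Int)) :
    PySem.List.pyIdx? n i = some i.toNat := by
  unfold PySem.List.pyIdx?
  rw [if_pos h0, if_pos h1]

theorem sloopB_pop (al : List (List Int)) (u i : Int) (fr : List (Int × Int)) (t : SCore)
    (hge : ¬ i < ((PySem.List.pyGetD al u []).length : Int)) :
    sloopB al ((u, i) :: fr) t = sloopB al fr (sfinish u t) := by
  rw [sloopB, dif_neg hge]

theorem sloopB_step_w (al : List (List Int)) (u i : Int) (fr : List (Int × Int)) (t : SCore)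
    (hlt : i < ((PySem.List.pyGetD al u []).length : Int))
    (hw : PySem.List.pyGetD t.color (PySem.List.pyGetD (PySem.List.pyGetD al u []) i 0) "" = "white") :
    sloopB al ((u, i) :: fr) t =
      sloopB al ((PySem.List.pyGetD (PySem.List.pyGetD al u []) i 0, 0) :: (u, i + 1) :: fr)
        (smark (PySem.List.pyGetD (PySem.List.pyGetD al u []) i 0) t) := by
  rw [sloopB, dif_pos hlt]
  simp only []
  rw [dif_pos hw]

theorem sloopB_step_nw (al : List (List Int)) (u i : Int) (fr : List (Int × Int)) (t : SCore)
    (hlt : i < ((PySem.List.pyGetD al u []).length : Int))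
    (hnw : ¬ PySem.List.pyGetD t.color (PySem.List.pyGetD (PySem.List.pyGetD al u []) i 0) "" = "white") :
    sloopB al ((u, i) :: fr) t = sloopB al ((u, i + 1) :: fr) t := by
  rw [sloopB, dif_pos hlt]
  simp only []
  rw [dif_neg hnw]

theorem LB (al : List (List Int)) :
    ∀ (k n : Nat) (u i : Int) (fr : List (Int × Int)) (t : SCore),
    0 ≤ i → ((PySem.List.pyGetD al u []).length : Int) - i ≤ (n : Int) →
    t.color.count "white" ≤ k →
    sloopB al ((u, i) :: fr) t =
      sloopB al fr (sfinish u (sfold al k ((PySem.List.pyGetD al u []).drop i.toNat) t)) := by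
  intro k
  induction k with
  | zero =>
    intro n
    induction n with
    | zero =>
      intro u i fr t hi hn h
      rw [sloopB_pop al u i fr t (by omega), List.drop_eq_nil_of_le (by omega)]
      rfl
    | succ n ihn =>
      intro u i fr t hi hn h
      by_cases hlt : i < ((PySem.List.pyGetD al u []).length : Int)
      · have hj : i.toNat < (PySem.List.pyGetD al u []).length := by omega
        have hvv : PySem.List.pyGetD (PySem.List.pyGetD al u []) i 0 =
            (PySem.List.pyGetD al u [])[i.toNat] := by
          rw [pyGetD_valid _ _ _ i.toNat (pyIdx?_of_nonneg _ _ hi hlt)]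
          exact List.getD_eq_getElem _ _ hj
        have hdc : (PySem.List.pyGetD al u []).drop i.toNat =
            PySem.List.pyGetD (PySem.List.pyGetD al u []) i 0 ::
              (PySem.List.pyGetD al u []).drop ((i + 1).toNat) := by
          rw [hvv, show ((i + 1).toNat) = i.toNat + 1 by omega]
          exact List.drop_eq_getElem_cons hj
        have hnw : ¬ PySem.List.pyGetD t.color
            (PySem.List.pyGetD (PySem.List.pyGetD al u []) i 0) "" = "white" := fun hwv =>
          absurd (white_cw_pos _ _ hwv) (by omega)
        rw [sloopB_step_nw al u i fr t hlt hnw,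
          ihn u (i + 1) fr t (by omega) (by omega) h, hdc, sfold_cons, if_neg hnw]
      · rw [sloopB_pop al u i fr t hlt, List.drop_eq_nil_of_le (by omega)]
        rfl
  | succ k ihk =>
    intro n
    induction n with
    | zero =>
      intro u i fr t hi hn h
      rw [sloopB_pop al u i fr t (by omega), List.drop_eq_nil_of_le (by omega)]
      rfl
    | succ n ihn =>
      intro u i fr t hi hn h
      by_cases hlt : i < ((PySem.List.pyGetD al u []).length : Int)
      · have hj : i.toNat < (PySem.List.pyGetD al u []).length := by omega
        have hvv : PySem.List.pyGetD (PySem.List.pyGetD al u []) i 0 =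
            (PySem.List.pyGetD al u [])[i.toNat] := by
          rw [pyGetD_valid _ _ _ i.toNat (pyIdx?_of_nonneg _ _ hi hlt)]
          exact List.getD_eq_getElem _ _ hj
        have hdc : (PySem.List.pyGetD al u []).drop i.toNat =
            PySem.List.pyGetD (PySem.List.pyGetD al u []) i 0 ::
              (PySem.List.pyGetD al u []).drop ((i + 1).toNat) := by
          rw [hvv, show ((i + 1).toNat) = i.toNat + 1 by omega]
          exact List.drop_eq_getElem_cons hj
        by_cases hw : PySem.List.pyGetD t.color
            (PySem.List.pyGetD (PySem.List.pyGetD al u []) i 0) "" = "white"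
        · rw [sloopB_step_w al u i fr t hlt hw]
          have h1 : (smark (PySem.List.pyGetD (PySem.List.pyGetD al u []) i 0) t).color.count "white" ≤ k := by
            have := cw_pySetD_lt t.color (PySem.List.pyGetD (PySem.List.pyGetD al u []) i 0)
              "gray" (by decide) hw
            show (PySem.List.pySetD t.color _ "gray").count "white" ≤ k
            omega
          rw [ihk (PySem.List.pyGetD al (PySem.List.pyGetD (PySem.List.pyGetD al u []) i 0) []).length
            (PySem.List.pyGetD (PySem.List.pyGetD al u []) i 0) 0 ((u, i + 1) :: fr) _
            le_rfl (by omega) h1]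
          rw [show ((0 : Int).toNat) = 0 from rfl, List.drop_zero, ← svisit_succ]
          rw [ihn u (i + 1) fr _ (by omega) (by omega)
            ((Rel_svisit al (k + 1) _ t).1.trans h)]
          rw [hdc, sfold_cons, if_pos hw]
        · rw [sloopB_step_nw al u i fr t hlt hw,
            ihn u (i + 1) fr t (by omega) (by omega) h, hdc, sfold_cons, if_neg hw]
      · rw [sloopB_pop al u i fr t hlt, List.drop_eq_nil_of_le (by omega)]
        rfl

-- both drivers compute the same observable state
theorem driver (al : List (List Int)) :
    ∀ (l : List Nat) (σA σB : DfsCore), obs σA = obs σB →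
    obs (l.foldl (fun σ u =>
        if PySem.List.pyGetD σ.color (u : Int) "" = "white" then
          loopA al [((u : Int), "start")] σ
        else σ) σA) =
    obs (l.foldl (fun σ r =>
        if PySem.List.pyGetD σ.color (r : Int) "" = "white" then
          let t := σ.time + 1
          loopB al [((r : Int), 0)]
            ⟨t, PySem.List.pySetD σ.color (r : Int) "gray", σ.parent,
             PySem.List.pySetD σ.d (r : Int) t, σ.f⟩
        else σ) σB) := by
  intro l
  induction l with
  | nil => intro σA σB h; exact h
  | cons u l ih =>
    intro σA σB h
    apply ih
    show obs (if PySem.List.pyGetD σA.color (u : Int) "" = "white" then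
        loopA al [((u : Int), "start")] σA else σA) =
      obs (if PySem.List.pyGetD σB.color (u : Int) "" = "white" then
        loopB al [((u : Int), 0)]
          ⟨σB.time + 1, PySem.List.pySetD σB.color (u : Int) "gray", σB.parent,
           PySem.List.pySetD σB.d (u : Int) (σB.time + 1), σB.f⟩ else σB)
    have hcol : σA.color = σB.color := congrArg SCore.color h
    by_cases hw : PySem.List.pyGetD σA.color (u : Int) "" = "white"
    · have hwB : PySem.List.pyGetD σB.color (u : Int) "" = "white" := by rw [← hcol]; exact hw
      rw [if_pos hw, if_pos hwB]
      rw [obs_loopA, obs_loopB, h]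
      rw [show obs (⟨σB.time + 1, PySem.List.pySetD σB.color (u : Int) "gray", σB.parent,
            PySem.List.pySetD σB.d (u : Int) (σB.time + 1), σB.f⟩ : DfsCore) =
          smark (u : Int) (obs σB) from rfl]
      have hwt : PySem.List.pyGetD (obs σB).color (u : Int) "" = "white" := hwB
      have hc1 : 1 ≤ (obs σB).color.count "white" := white_cw_pos _ _ hwt
      have hA := LA al ((obs σB).color.count "white") [(u : Int)] [] (obs σB) le_rfl
      simp only [List.map_cons, List.map_nil, List.cons_append, List.nil_append] at hA
      rw [hA]
      have hmk : (smark (u : Int) (obs σB)).color.count "white" ≤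
          (obs σB).color.count "white" - 1 := by
        have := cw_pySetD_lt (obs σB).color (u : Int) "gray" (by decide) hwt
        show (PySem.List.pySetD (obs σB).color (u : Int) "gray").count "white" ≤ _
        omega
      have hB := LB al ((obs σB).color.count "white" - 1)
        (PySem.List.pyGetD al (u : Int) []).length (u : Int) 0 []
        (smark (u : Int) (obs σB)) le_rfl (by omega) hmk
      rw [hB]
      rw [sloopA, sloopB]
      rw [sfold_cons, if_pos hwt]
      rw [show ((0 : Int).toNat) = 0 from rfl, List.drop_zero, ← svisit_succ,
        Nat.sub_add_cancel hc1]
      rfl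
    · have hwB : ¬ PySem.List.pyGetD σB.color (u : Int) "" = "white" := by rw [← hcol]; exact hw
      rw [if_neg hw, if_neg hwB]
      exact h

-- ===== VERDICT (by name: the statement is the Claim_ definition above) =====
theorem dfs_spec : Claim_equal_dfs := by
  intro al _ _
  unfold Spec_dfs dfs dfs_alt
  have h := driver al (List.range al.length)
    ⟨0, List.replicate al.length "white", List.replicate al.length none,
     List.replicate al.length 0, List.replicate al.length 0⟩
    ⟨0, List.replicate al.length "white", List.replicate al.length none,
     List.replicate al.length 0, List.replicate al.length 0⟩ rfl
  have hd := congrArg SCore.d h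
  exact hd
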